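-- pv_equiv track=rewrite | github.com/jgilles23/projectEuler | pe175.py | reverse_binary
-- ===== SOURCE A (Python) =====
-- def reverse_binary(E, F):
--     binary_string = "1"
--     while E > 1 or F > 1:
--         #Try 0
--         E0, F0 = F, 2*F - E
--         zero_valid = E0 >= 1 and F0 >= 1 and E0 >= F0
--         #Try 1
--         E1, F1 = E - F, F
--         one_valid = E1 >= 1 and F1 >= 1 and E1 >= F1
--         #Set E,F to the correct values
--         if zero_valid and one_valid:
--             raise Exception("Both zero and one found as valid solutions")
--         elif zero_valid:
--             binary_string = "0" + binary_string
--             E,F = E0,F0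
--         elif one_valid:
--             binary_string = "1" + binary_string
--             E,F = E1, F1
--         else:
--             raise Exception("Neither found as valid solution")
--     return int(binary_string,2)
-- ===== SOURCE B (Python) =====
-- def reverse_binary(E, F):
--     # Batched descent: a run of '1' steps (E -= F while E >= 2F) and a run of
--     # '0' steps (the difference d = E - F is invariant; E -= d each step) are
--     # emitted as whole Euclidean quotients, collected as chunks and joined once.
--     chunks = []
--     while E > 1 or F > 1:
--         if E >= 2 * F:
--             k = E // F - 1                 # length of the run of '1' bits
--             chunks.append("1" * k)
--             E -= k * F
--         else:
--             d = E - F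
--             j = (E + d - 1) // d - 2       # length of the run of '0' bits
--             chunks.append("0" * j)
--             E -= j * d
--             F = E - d
--     chunks.reverse()
--     return int("".join(chunks) + "1", 2)
-- ===== Notes on version B (the rewrite author's own statement) =====
-- stated objective: alternative
-- what changed: Instead of one descent step (and one string prepend) per emitted bit, B batches each maximal run of identical bits into a single Euclidean-quotient computation, collects the runs as chunks and joins them once.
import Mathlib
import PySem

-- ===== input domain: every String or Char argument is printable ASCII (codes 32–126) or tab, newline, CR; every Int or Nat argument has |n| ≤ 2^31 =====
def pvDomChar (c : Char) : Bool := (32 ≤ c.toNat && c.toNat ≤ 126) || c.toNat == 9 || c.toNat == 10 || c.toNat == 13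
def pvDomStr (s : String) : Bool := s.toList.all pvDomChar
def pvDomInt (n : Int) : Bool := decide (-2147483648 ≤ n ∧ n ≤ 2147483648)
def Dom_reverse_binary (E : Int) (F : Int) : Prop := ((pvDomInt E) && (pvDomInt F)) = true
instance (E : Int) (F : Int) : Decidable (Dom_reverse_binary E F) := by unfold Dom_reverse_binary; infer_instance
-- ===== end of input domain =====

-- B batches each maximal run of identical output bits into one Euclidean-quotient
-- step and joins the collected run chunks once, instead of A's one string-prepend per bit.

-- ===== PORT A =====
-- A's while-loop: state (E, F, binary_string), the string as a List Char.
-- The locals E0 = F, F0 = 2F-E, E1 = E-F, F1 = F and the two validity tests are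
-- inlined.  Fuel makes the recursion total; under Pre_ the loop runs at most
-- E-1 times, so E.toNat + F.toNat + 1 iterations are never exhausted.  The two
-- `raise Exception` branches (both valid / neither valid) return the current
-- string; under Pre_ they are unreachable.
def goA : Nat → Int → Int → List Char → List Char
  | 0, _, _, s => s
  | fuel+1, E, F, s =>
    if 1 < E ∨ 1 < F then
      if (1 ≤ F ∧ 1 ≤ 2*F - E ∧ 2*F - E ≤ F) ∧ (1 ≤ E - F ∧ 1 ≤ F ∧ F ≤ E - F) then s
      else if 1 ≤ F ∧ 1 ≤ 2*F - E ∧ 2*F - E ≤ F then goA fuel F (2*F - E) ('0' :: s)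
      else if 1 ≤ E - F ∧ 1 ≤ F ∧ F ≤ E - F then goA fuel (E - F) F ('1' :: s)
      else s
    else s

-- int(binary_string, 2): the string is always a nonempty '0'/'1' literal, so the
-- ValueError case (none) is unreachable.
def reverse_binary (E : Int) (F : Int) : Int :=
  match PySem.Int.ofCharsBase? (goA (E.toNat + F.toNat + 1) E F ['1']) 2 with
  | some n => n
  | none => 0

-- ===== PORT B =====
-- B's while-loop: chunks is a list of runs; "1" * k is List.replicate k.toNat '1'
-- (exact: Python's repetition by a negative count is also empty).  Fuel as in A.
def goB : Nat → Int → Int → List (List Char) → List (List Char)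
  | 0, _, _, ch => ch
  | fuel+1, E, F, ch =>
    if 1 < E ∨ 1 < F then
      if 2*F ≤ E then
        let k := PySem.Int.floordiv E F - 1
        goB fuel (E - k*F) F (ch ++ [List.replicate k.toNat '1'])
      else
        let d := E - F
        let j := PySem.Int.floordiv (E + d - 1) d - 2
        goB fuel (E - j*d) ((E - j*d) - d) (ch ++ [List.replicate j.toNat '0'])
    else ch

-- chunks.reverse(); int("".join(chunks) + "1", 2)
def reverse_binary_alt (E : Int) (F : Int) : Int :=
  match PySem.Int.ofCharsBase? ((goB (E.toNat + F.toNat + 1) E F []).reverse.flatten ++ ['1']) 2 with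
  | some n => n
  | none => 0

-- ===== PRECONDITION & SPEC =====
-- Pre_ is exactly the set of inputs on which A returns: either the loop never
-- starts (E ≤ 1 and F ≤ 1, returning 1), or 1 ≤ F ≤ E with gcd(E, F) = 1.
-- On every excluded input A produces no value: with 1 ≤ F ≤ E and gcd > 1 the
-- descent reaches E = F = gcd > 1 and loops forever; on the remaining excluded
-- inputs A raises its explicit Exception.
def Pre_reverse_binary (E : Int) (F : Int) : Prop :=
  (E ≤ 1 ∧ F ≤ 1) ∨ (1 ≤ F ∧ F ≤ E ∧ Int.gcd E F = 1)
instance (E : Int) (F : Int) : Decidable (Pre_reverse_binary E F) := by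
  unfold Pre_reverse_binary; infer_instance

def pvWitness_reverse_binary : Int × Int := (5, 3)

def Spec_reverse_binary (E : Int) (F : Int) (out : Int) : Prop := out = reverse_binary_alt E F
instance (E : Int) (F : Int) (out : Int) : Decidable (Spec_reverse_binary E F out) := by
  unfold Spec_reverse_binary; infer_instance

-- ===== CLAIM (what is proved, stated in full; the proofs are below) =====
def Claim_equal_reverse_binary : Prop := ∀ (E : Int) (F : Int), Dom_reverse_binary E F → Pre_reverse_binary E F → Spec_reverse_binary E F (reverse_binary E F)

-- ===== LEMMAS AND PROOFS =====

-- coprimality is preserved by subtracting a multiple of the other argument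
theorem pv_cop_sub {E F : Int} (c : Int) (h : IsCoprime E F) : IsCoprime (E - c*F) F := by
  have h2 := h.add_mul_left_left (-c)
  have e : E + F * -c = E - c*F := by ring
  rwa [e] at h2

-- when the loop guard is false both loops return their accumulator unchanged
theorem goA_stop (fa : Nat) (E F : Int) (s : List Char) (h : ¬ (1 < E ∨ 1 < F)) :
    goA fa E F s = s := by
  cases fa with
  | zero => rfl
  | succ n => simp [goA, h]

theorem goB_stop (fb : Nat) (E F : Int) (ch : List (List Char)) (h : ¬ (1 < E ∨ 1 < F)) :
    goB fb E F ch = ch := by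
  cases fb with
  | zero => rfl
  | succ n => simp [goB, h]

-- goB only appends to its accumulator
theorem goB_acc (fb : Nat) : ∀ (E F : Int) (ch : List (List Char)),
    goB fb E F ch = ch ++ goB fb E F [] := by
  induction fb with
  | zero => intro E F ch; simp [goB]
  | succ n IH =>
    intro E F ch
    by_cases hg : 1 < E ∨ 1 < F
    · by_cases hb : 2*F ≤ E
      · simp only [goB, if_pos hg, if_pos hb]
        conv_lhs => rw [IH]
        conv_rhs => rw [IH]
        simp
      · simp only [goB, if_pos hg, if_neg hb]
        conv_lhs => rw [IH]
        conv_rhs => rw [IH]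
        simp
    · rw [goB_stop _ _ _ _ hg, goB_stop _ _ _ _ hg]
      simp

-- m consecutive one-steps of A (valid as long as F ≤ E - m*F)
theorem goA_ones (m : Nat) : ∀ (fa : Nat) (E F : Int) (s : List Char),
    1 ≤ F → F ≤ E - (m:Int)*F → m ≤ fa →
    goA fa E F s = goA (fa - m) (E - (m:Int)*F) F (List.replicate m '1' ++ s) := by
  induction m with
  | zero => intro fa E F s _ _ _; simp
  | succ m IH =>
    intro fa E F s hF hm hfa
    obtain ⟨fa', rfl⟩ : ∃ t, fa = t + 1 := ⟨fa - 1, by omega⟩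
    push_cast at hm ⊢
    have hmF : 0 ≤ (m:Int) * F := by positivity
    have h2F : 2*F ≤ E := by nlinarith
    have hg : 1 < E ∨ 1 < F := by left; omega
    have hnz : ¬ ((1 ≤ F ∧ 1 ≤ 2*F - E ∧ 2*F - E ≤ F) ∧ (1 ≤ E - F ∧ 1 ≤ F ∧ F ≤ E - F)) := by
      rintro ⟨⟨_, h1, _⟩, _⟩; omega
    have hz : ¬ (1 ≤ F ∧ 1 ≤ 2*F - E ∧ 2*F - E ≤ F) := by
      rintro ⟨_, h1, _⟩; omega
    have ho : 1 ≤ E - F ∧ 1 ≤ F ∧ F ≤ E - F := ⟨by omega, hF, by nlinarith⟩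
    simp only [goA]
    rw [if_pos hg, if_neg hnz, if_neg hz, if_pos ho]
    rw [IH fa' (E - F) F ('1' :: s) hF (by nlinarith) (by omega)]
    rw [show E - ((m:Int) + 1)*F = E - F - (m:Int)*F from by ring]
    rw [List.replicate_succ', List.append_assoc, List.singleton_append]

-- m consecutive zero-steps of A from (E, E - d); the difference d is invariant
theorem goA_zeros (m : Nat) : ∀ (fa : Nat) (E d F : Int) (s : List Char),
    F = E - d → 1 ≤ d → ((m:Int) + 1) * d < E → m ≤ fa →
    goA fa E F s
      = goA (fa - m) (E - (m:Int)*d) (E - (m:Int)*d - d) (List.replicate m '0' ++ s) := by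
  induction m with
  | zero => intro fa E d F s hF _ _ _; subst hF; simp
  | succ m IH =>
    intro fa E d F s hF hd hm hfa
    subst hF
    obtain ⟨fa', rfl⟩ : ∃ t, fa = t + 1 := ⟨fa - 1, by omega⟩
    push_cast at hm ⊢
    have hmd : 0 ≤ (m:Int) * d := by positivity
    have h2d : 2*d < E := by nlinarith
    have hg : 1 < E ∨ 1 < E - d := by left; omega
    have hnz : ¬ ((1 ≤ E - d ∧ 1 ≤ 2*(E - d) - E ∧ 2*(E - d) - E ≤ E - d) ∧
        (1 ≤ E - (E - d) ∧ 1 ≤ E - d ∧ E - d ≤ E - (E - d))) := by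
      rintro ⟨_, ⟨_, _, h3⟩⟩; omega
    have hz : 1 ≤ E - d ∧ 1 ≤ 2*(E - d) - E ∧ 2*(E - d) - E ≤ E - d := ⟨by omega, by omega, by omega⟩
    simp only [goA]
    rw [if_pos hg, if_neg hnz, if_pos hz]
    rw [IH fa' (E - d) d (2*(E - d) - E) ('0' :: s) (by ring) hd (by nlinarith) (by omega)]
    rw [show E - ((m:Int) + 1)*d = E - d - (m:Int)*d from by ring]
    rw [List.replicate_succ', List.append_assoc, List.singleton_append]

-- the main simulation: on the invariant region 1 ≤ F ≤ E, E coprime to F,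
-- A's final string is B's reversed-and-joined chunk list prepended to any suffix
theorem pv_main (n : Nat) : ∀ (E F : Int) (s : List Char) (fa fb : Nat),
    E.toNat ≤ n → E.toNat ≤ fa → E.toNat ≤ fb →
    1 ≤ F → F ≤ E → IsCoprime E F →
    goA fa E F s = (goB fb E F []).reverse.flatten ++ s := by
  induction n using Nat.strong_induction_on with
  | _ n IH =>
    intro E F s fa fb hn hfa hfb hF hFE hcop
    by_cases hg : 1 < E ∨ 1 < F
    · -- the loop steps; E = F is impossible (coprime would force E = F = 1)
      have hEF : F < E := by
        rcases lt_or_eq_of_le hFE with h | h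
        · exact h
        · exfalso
          subst h
          have hu : IsUnit F := hcop.isUnit_of_dvd' dvd_rfl dvd_rfl
          rcases Int.isUnit_iff.mp hu with h1 | h1 <;> rcases hg with h2 | h2 <;> omega
      obtain ⟨fa', rfl⟩ : ∃ t, fa = t + 1 := ⟨fa - 1, by omega⟩
      obtain ⟨fb', rfl⟩ : ∃ t, fb = t + 1 := ⟨fb - 1, by omega⟩
      by_cases hbr : 2*F ≤ E
      · -- a run of '1' bits: k = E // F - 1 one-steps
        have hF0 : 0 < F := by omega
        obtain ⟨q, hq⟩ : ∃ t, t = E / F := ⟨_, rfl⟩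
        have hfd : PySem.Int.floordiv E F = q - 1 + 1 := by
          rw [hq]; rw [PySem.Int.floordiv_eq_ediv_of_pos hF0]; ring
        have hE : F * q + E % F = E := by rw [hq]; exact Int.mul_ediv_add_emod E F
        have hr0 : 0 ≤ E % F := Int.emod_nonneg E (by omega)
        have hrF : E % F < F := Int.emod_lt_of_pos E hF0
        have hq2 : 2 ≤ q := by nlinarith
        have hkm : ((q - 1).toNat : Int) = q - 1 := by omega
        have hst : E - (q - 1)*F = E % F + F := by linear_combination -hE
        have hkk : q - 1 ≤ (q - 1)*F := le_mul_of_one_le_right (by omega) (by omega)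
        have hqE : q ≤ E := by rw [hq]; exact Int.ediv_le_self F (by omega)
        have hcop' : IsCoprime (E % F + F) F := by
          have h2 := pv_cop_sub (q - 1) hcop
          rwa [hst] at h2
        simp only [goB, if_pos hg, if_pos hbr, hfd, add_sub_cancel_right]
        conv_rhs => rw [goB_acc]
        rw [goA_ones (q - 1).toNat (fa' + 1) E F s hF (by rw [hkm, hst]; omega) (by omega)]
        rw [hkm, hst]
        rw [IH (E % F + F).toNat (by omega) (E % F + F) F
              (List.replicate (q - 1).toNat '1' ++ s) (fa' + 1 - (q - 1).toNat) fb'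
              (le_refl _) (by omega) (by omega) hF (by omega) hcop']
        simp
      · -- a run of '0' bits: d = E - F is invariant; j = ceil(E/d) - 2 zero-steps
        have hd1 : 1 ≤ E - F := by omega
        have h2d : 2*(E - F) < E := by omega
        obtain ⟨q, hq⟩ : ∃ t, t = (E + (E - F) - 1) / (E - F) := ⟨_, rfl⟩
        have hfd : PySem.Int.floordiv (E + (E - F) - 1) (E - F) = q - 2 + 2 := by
          rw [hq]; rw [PySem.Int.floordiv_eq_ediv_of_pos (by omega)]; ring
        have hE : (E - F) * q + (E + (E - F) - 1) % (E - F) = E + (E - F) - 1 := by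
          rw [hq]; exact Int.mul_ediv_add_emod _ _
        have hr0 : 0 ≤ (E + (E - F) - 1) % (E - F) := Int.emod_nonneg _ (by omega)
        have hrd : (E + (E - F) - 1) % (E - F) < E - F := Int.emod_lt_of_pos _ (by omega)
        have hq3 : 3 ≤ q := by nlinarith
        have hjm : ((q - 2).toNat : Int) = q - 2 := by omega
        have hFv : E - (q - 2)*(E - F) - (E - F) = (E + (E - F) - 1) % (E - F) + 1 := by
          linear_combination -hE
        have hEv : E - (q - 2)*(E - F) = (E + (E - F) - 1) % (E - F) + 1 + (E - F) := by
          linear_combination -hE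
        have hjj : q - 2 ≤ (q - 2)*(E - F) := le_mul_of_one_le_right (by omega) (by omega)
        have hcop' : IsCoprime (E - (q - 2)*(E - F)) (E - (q - 2)*(E - F) - (E - F)) := by
          have c1 : IsCoprime (E - F) F := by
            have := pv_cop_sub 1 hcop
            rwa [one_mul] at this
          have c2 : IsCoprime (F - (q - 2)*(E - F)) (E - F) := pv_cop_sub (q - 2) c1.symm
          have c3 : IsCoprime (E - (q - 2)*(E - F)) (F - (q - 2)*(E - F)) := by
            have c4 := pv_cop_sub (-1) c2.symm
            rwa [show (E - F) - (-1)*(F - (q - 2)*(E - F)) = E - (q - 2)*(E - F) from by ring] at c4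
          rw [show E - (q - 2)*(E - F) - (E - F) = F - (q - 2)*(E - F) from by ring]
          exact c3
        simp only [goB, if_pos hg, if_neg hbr, hfd, add_sub_cancel_right]
        conv_rhs => rw [goB_acc]
        rw [goA_zeros (q - 2).toNat (fa' + 1) E (E - F) F s (by ring) hd1
              (by rw [hjm]
                  rw [show (q - 2 + 1)*(E - F) = (q - 2)*(E - F) + (E - F) from by ring]
                  omega)
              (by omega)]
        rw [hjm]
        rw [IH (E - (q - 2)*(E - F)).toNat (by omega) (E - (q - 2)*(E - F))
              (E - (q - 2)*(E - F) - (E - F)) (List.replicate (q - 2).toNat '0' ++ s)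
              (fa' + 1 - (q - 2).toNat) fb'
              (le_refl _) (by omega) (by omega) (by omega) (by omega) hcop']
        simp
    · -- guard false: both loops stop immediately
      rw [goA_stop _ _ _ _ hg, goB_stop _ _ _ _ hg]
      simp

-- ===== VERDICT (by name: the statement is the Claim_ definition above) =====
theorem reverse_binary_spec : Claim_equal_reverse_binary := by
  intro E F _ hpre
  unfold Spec_reverse_binary reverse_binary reverse_binary_alt
  rcases hpre with ⟨hE, hF⟩ | ⟨h1, h2, h3⟩
  · have hg : ¬ (1 < E ∨ 1 < F) := by omega
    rw [goA_stop _ _ _ _ hg, goB_stop _ _ _ _ hg]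
    rfl
  · have hcop : IsCoprime E F := Int.isCoprime_iff_gcd_eq_one.mpr h3
    rw [pv_main E.toNat E F ['1'] (E.toNat + F.toNat + 1) (E.toNat + F.toNat + 1)
          (le_refl _) (by omega) (by omega) h1 h2 hcop]
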